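-- pv_equiv track=rewrite | github.com/Prasannav082003/ZREAL-ENGINE | scene_optimizer.py | _resolve_selected_layer_hint
-- ===== SOURCE A (Python) =====
-- from typing import Dict, List, Any, Set, Tuple, Optional
--
-- def _resolve_selected_layer_hint(
--     selected_layer_raw: str,
--     layers: Dict[str, Any],
-- ) -> Tuple[Optional[str], Optional[str]]:
--     """
--     Resolve a selectedLayer hint to a concrete layer id.
--
--     The hint may be a layer key, the layer id field, or the layer name.
--     Returns (layer_id, match_reason) or (None, None) if no match exists.
--     """
--     hint = str(selected_layer_raw or "").strip()
--     if not hint: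
--         return None, None
--
--     def _norm(value: Any) -> str:
--         return "".join(ch for ch in str(value).lower() if ch.isalnum())
--
--     hint_norm = _norm(hint)
--
--     if hint in layers:
--         return hint, "exact key"
--
--     for layer_id, layer in layers.items():
--         candidates = (layer_id, layer.get("id"), layer.get("name"))
--         for candidate in candidates:
--             if candidate is None:
--                 continue
--             candidate_text = str(candidate).strip()
--             if not candidate_text:
--                 continue
--             if candidate_text == hint:
--                 return layer_id, "exact id/name"
--             if _norm(candidate_text) == hint_norm:
--                 return layer_id, "normalized id/name"
--
--     for layer_id, layer in layers.items():
--         candidates = (layer_id, layer.get("id"), layer.get("name"))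
--         for candidate in candidates:
--             candidate_text = str(candidate or "").strip()
--             if not candidate_text:
--                 continue
--             candidate_norm = _norm(candidate_text)
--             if not candidate_norm:
--                 continue
--             if hint_norm.startswith(candidate_norm) or candidate_norm.startswith(hint_norm):
--                 return layer_id, "prefix match"
--
--     return None, None
-- ===== SOURCE B (Python) =====
-- from typing import Dict, List, Any, Set, Tuple, Optional
--
--
-- def _resolve_selected_layer_hint(
--     selected_layer_raw: str,
--     layers: Dict[str, Any],
-- ) -> Tuple[Optional[str], Optional[str]]:
--     """Single-pass variant: exact/normalized hits return immediately; the
--     first prefix hit is remembered and used only if no exact/normalized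
--     match exists anywhere."""
--     hint = str(selected_layer_raw or "").strip()
--     if not hint:
--         return None, None
--
--     def _norm(value: Any) -> str:
--         return "".join(ch for ch in str(value).lower() if ch.isalnum())
--
--     hint_norm = _norm(hint)
--
--     if hint in layers:
--         return hint, "exact key"
--
--     pending: Optional[Tuple[str, str]] = None
--     for layer_id, layer in layers.items():
--         candidates = (layer_id, layer.get("id"), layer.get("name"))
--         hit = _exact_or_norm_hit(hint, hint_norm, layer_id, candidates)
--         if hit is not None:
--             return hit
--         if pending is None and _has_prefix_hit(hint_norm, candidates, _norm):
--             pending = (layer_id, "prefix match")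
--
--     if pending is not None:
--         return pending
--     return None, None
--
--
-- def _exact_or_norm_hit(hint, hint_norm, layer_id, candidates):
--     def _norm(value):
--         return "".join(ch for ch in str(value).lower() if ch.isalnum())
--
--     for candidate in candidates:
--         if candidate is None:
--             continue
--         candidate_text = str(candidate).strip()
--         if not candidate_text:
--             continue
--         if candidate_text == hint:
--             return layer_id, "exact id/name"
--         if _norm(candidate_text) == hint_norm:
--             return layer_id, "normalized id/name"
--     return None
--
--
-- def _has_prefix_hit(hint_norm, candidates, _norm):
--     return any(
--         (lambda t: t and _norm(t) and (hint_norm.startswith(_norm(t)) or _norm(t).startswith(hint_norm)))(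
--             str(candidate or "").strip()
--         )
--         for candidate in candidates
--     )
-- ===== Notes on version B (the rewrite author's own statement) =====
-- stated objective: alternative
-- what changed: The two separate passes over the layers dict (exact/normalized pass, then prefix pass) are fused into a single loop that returns exact/normalized hits immediately and remembers the first prefix hit in a pending variable, returned only after the loop if no exact/normalized match exists.
import Mathlib
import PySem

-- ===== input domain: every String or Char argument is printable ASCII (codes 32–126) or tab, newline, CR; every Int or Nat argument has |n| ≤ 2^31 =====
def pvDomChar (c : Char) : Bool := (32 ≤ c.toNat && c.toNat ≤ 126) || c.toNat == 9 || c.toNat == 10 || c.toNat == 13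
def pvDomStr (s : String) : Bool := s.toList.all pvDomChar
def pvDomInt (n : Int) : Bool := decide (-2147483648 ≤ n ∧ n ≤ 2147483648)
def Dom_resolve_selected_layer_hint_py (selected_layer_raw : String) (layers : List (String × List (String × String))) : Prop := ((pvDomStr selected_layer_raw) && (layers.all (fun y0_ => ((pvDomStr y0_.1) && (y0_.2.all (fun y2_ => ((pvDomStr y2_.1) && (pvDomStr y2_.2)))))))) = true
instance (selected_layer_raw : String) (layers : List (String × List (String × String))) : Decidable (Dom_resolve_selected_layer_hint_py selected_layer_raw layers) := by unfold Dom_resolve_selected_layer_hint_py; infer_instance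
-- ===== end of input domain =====

-- ===== PORT A =====
-- B changes only the loop organisation: one pass with a pending prefix result instead of two passes (objective: alternative decomposition, same cost).
-- shared helper: Python's local `_norm(value)` (identical in A and B)
def pvNorm (s : String) : String :=
  String.ofList (((PySem.Str.lower s).toList).filter (fun ch => PySem.Chars.isalnum ch))

-- shared helper: `layer.get(k)` on the association-list representation of the inner dict
def pvGetKV (layer : List (String × String)) (k : String) : Option String :=
  (layer.find? (fun p => p.1 == k)).map (fun p => p.2)

-- A, inner candidate loop of the first pass (exact / normalized)
def pvCand1 (hint hintNorm lid : String) : List (Option String) → Option (String × String)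
  | [] => none
  | none :: rest => pvCand1 hint hintNorm lid rest
  | some c :: rest =>
    let t := PySem.Str.strip c
    if t = "" then pvCand1 hint hintNorm lid rest
    else if t = hint then some (lid, "exact id/name")
    else if pvNorm t = hintNorm then some (lid, "normalized id/name")
    else pvCand1 hint hintNorm lid rest

-- A, inner candidate loop of the second pass (prefix)
def pvCand2 (hintNorm lid : String) : List (Option String) → Option (String × String)
  | [] => none
  | c :: rest =>
    let t := PySem.Str.strip (c.getD "")
    if t = "" then pvCand2 hintNorm lid rest
    else
      let cn := pvNorm t
      if cn = "" then pvCand2 hintNorm lid rest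
      else if PySem.Str.startswith hintNorm cn || PySem.Str.startswith cn hintNorm then
        some (lid, "prefix match")
      else pvCand2 hintNorm lid rest

def pvCandsOf (lid : String) (layer : List (String × String)) : List (Option String) :=
  [some lid, pvGetKV layer "id", pvGetKV layer "name"]

-- A, first `for layer_id, layer in layers.items()` loop
def pvLoop1 (hint hintNorm : String) : List (String × List (String × String)) → Option (String × String)
  | [] => none
  | (lid, layer) :: rest =>
    match pvCand1 hint hintNorm lid (pvCandsOf lid layer) with
    | some r => some r
    | none => pvLoop1 hint hintNorm rest

-- A, second `for layer_id, layer in layers.items()` loop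
def pvLoop2 (hintNorm : String) : List (String × List (String × String)) → Option (String × String)
  | [] => none
  | (lid, layer) :: rest =>
    match pvCand2 hintNorm lid (pvCandsOf lid layer) with
    | some r => some r
    | none => pvLoop2 hintNorm rest

def resolve_selected_layer_hint_py (selected_layer_raw : String) (layers : List (String × List (String × String))) : Option String × Option String :=
  let hint := PySem.Str.strip selected_layer_raw  -- str(x or "").strip(): x is a str, so this is x.strip()
  if hint = "" then (none, none)
  else
    let hintNorm := pvNorm hint
    if layers.any (fun p => p.1 == hint) then (some hint, some "exact key")
    else
      match pvLoop1 hint hintNorm layers with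
      | some (lid, r) => (some lid, some r)
      | none =>
        match pvLoop2 hintNorm layers with
        | some (lid, r) => (some lid, some r)
        | none => (none, none)

-- ===== PORT B =====
-- B, `_has_prefix_hit`: any-candidate prefix test for one layer
def pvPrefixHit (hintNorm : String) (cands : List (Option String)) : Bool :=
  cands.any (fun c =>
    let t := PySem.Str.strip (c.getD "")
    t ≠ "" && (pvNorm t ≠ "" && (PySem.Str.startswith hintNorm (pvNorm t) || PySem.Str.startswith (pvNorm t) hintNorm)))

-- B, the single loop: exact/normalized hit returns at once; first prefix hit is kept pending
def pvScan (hint hintNorm : String) (pending : Option (String × String)) :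
    List (String × List (String × String)) → Option (String × String)
  | [] => pending
  | (lid, layer) :: rest =>
    let cands := pvCandsOf lid layer
    match pvCand1 hint hintNorm lid cands with  -- B's `_exact_or_norm_hit` = the same candidate loop as A's first pass
    | some r => some r
    | none =>
      let pending' := if pending = none && pvPrefixHit hintNorm cands then some (lid, "prefix match") else pending
      pvScan hint hintNorm pending' rest

def resolve_selected_layer_hint_py_alt (selected_layer_raw : String) (layers : List (String × List (String × String))) : Option String × Option String :=
  let hint := PySem.Str.strip selected_layer_raw
  if hint = "" then (none, none)
  else
    let hintNorm := pvNorm hint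
    if layers.any (fun p => p.1 == hint) then (some hint, some "exact key")
    else
      match pvScan hint hintNorm none layers with
      | some (lid, r) => (some lid, some r)
      | none => (none, none)

-- ===== PRECONDITION & SPEC =====
-- Pre_: the outer dict's keys and each inner dict's keys are duplicate-free, which every Python dict
-- guarantees; it excludes no Python-representable input, only assoc lists that do not denote a dict.
def Pre_resolve_selected_layer_hint_py (selected_layer_raw : String) (layers : List (String × List (String × String))) : Prop :=
  (layers.map Prod.fst).Nodup ∧ ∀ p ∈ layers, (p.2.map Prod.fst).Nodup
instance (selected_layer_raw : String) (layers : List (String × List (String × String))) : Decidable (Pre_resolve_selected_layer_hint_py selected_layer_raw layers) := by unfold Pre_resolve_selected_layer_hint_py; infer_instance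
def pvWitness_resolve_selected_layer_hint_py : String × (List (String × List (String × String))) :=
  ("Layer 1", [("l1", [("id", "l1"), ("name", "Layer 1")]), ("l2", [("name", "Other")])])

def Spec_resolve_selected_layer_hint_py (selected_layer_raw : String) (layers : List (String × List (String × String))) (out : Option String × Option String) : Prop := out = resolve_selected_layer_hint_py_alt selected_layer_raw layers
instance (selected_layer_raw : String) (layers : List (String × List (String × String))) (out : Option String × Option String) : Decidable (Spec_resolve_selected_layer_hint_py selected_layer_raw layers out) := by unfold Spec_resolve_selected_layer_hint_py; infer_instance

-- ===== CLAIM (what is proved, stated in full; the proofs are below) =====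
def Claim_equal_resolve_selected_layer_hint_py : Prop := ∀ (selected_layer_raw : String) (layers : List (String × List (String × String))), Dom_resolve_selected_layer_hint_py selected_layer_raw layers → Pre_resolve_selected_layer_hint_py selected_layer_raw layers → Spec_resolve_selected_layer_hint_py selected_layer_raw layers (resolve_selected_layer_hint_py selected_layer_raw layers)

-- ===== LEMMAS AND PROOFS =====
-- per layer: A's second-pass candidate loop hits iff B's boolean does, and then yields "prefix match"
lemma cand2_eq_prefixHit (hintNorm lid : String) (cands : List (Option String)) :
    pvCand2 hintNorm lid cands = if pvPrefixHit hintNorm cands then some (lid, "prefix match") else none := by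
  induction cands with
  | nil => simp [pvCand2, pvPrefixHit]
  | cons c rest ih =>
    simp only [pvCand2, pvPrefixHit, List.any_cons] at *
    split_ifs <;> simp_all

-- the single pass equals: first pass result, else pending, else second pass result
lemma scan_eq (hint hintNorm : String) (layers : List (String × List (String × String))) :
    ∀ pending, pvScan hint hintNorm pending layers =
      match pvLoop1 hint hintNorm layers with
      | some r => some r
      | none =>
        match pending with
        | some p => some p
        | none => pvLoop2 hintNorm layers := by
  induction layers with
  | nil => intro pending; cases pending <;> simp [pvScan, pvLoop1, pvLoop2]
  | cons hd rest ih =>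
    intro pending
    obtain ⟨lid, layer⟩ := hd
    simp only [pvScan, pvLoop1, pvLoop2]
    cases h1 : pvCand1 hint hintNorm lid (pvCandsOf lid layer) with
    | some r => rfl
    | none =>
      rw [ih]
      cases pending with
      | some p => simp
      | none => rw [cand2_eq_prefixHit]; split_ifs <;> simp_all

-- ===== VERDICT (by name: the statement is the Claim_ definition above) =====
theorem resolve_selected_layer_hint_py_spec : Claim_equal_resolve_selected_layer_hint_py := by
  intro selected_layer_raw layers _ _
  unfold Spec_resolve_selected_layer_hint_py
  unfold resolve_selected_layer_hint_py resolve_selected_layer_hint_py_alt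
  simp only [scan_eq]
  split_ifs <;> try rfl
  cases pvLoop1 (PySem.Str.strip selected_layer_raw) (pvNorm (PySem.Str.strip selected_layer_raw)) layers <;> rfl
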